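-- pv_equiv track=rewrite | github.com/jlutrera/Advent-of-Code-2025 | 2024/D21/p21_1.py | bfs
-- ===== SOURCE A (Python) =====
-- movimientos = [(-1, 0, '^'), (0, 1, '>'), (1, 0, 'v'), (0, -1, '<')]
--
-- def bfs(start, goal, mapa):
--     """
--     Encuentra todos los caminos más cortos entre un punto inicial y final en un mapa.
--
--     Args:
--         start: Tupla (fila, columna) representando el punto de inicio.
--         goal: Tupla (fila, columna) representando el punto final.
--         mapa: Lista de listas representando el mapa, donde '.' son espacios válidos y '#' son obstáculos.
--
--     Returns:
--         Lista de listas, donde cada lista interna representa un camino más corto.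
--     """
--
--     stack = [(start[0], start[1], [], set(), 0)]  # (fila, columna, camino, visitados, longitud)
--     resultados = []
--     min_length = float('inf')  # Inicializamos la longitud mínima a infinito
--
--     while stack:
--         x, y, path, visited, length = stack.pop()
--
--         if (x, y) == goal:
--             if length < min_length:
--                 resultados = [path]  # Reemplazamos los resultados si encontramos un camino más corto
--                 min_length = length
--             elif length == min_length:
--                 resultados.append(path)  # Agregamos el camino si tiene la misma longitud mínima
--             continue
--
--         for dx, dy, direction in movimientos:
--             nx, ny = x + dx, y + dy
--             if 0 <= nx < len(mapa) and 0 <= ny < len(mapa[nx]) and mapa[nx][ny] is not None and (nx, ny) not in visited: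
--                 new_visited = visited.copy()
--                 new_visited.add((nx, ny))
--                 stack.append((nx, ny, path + [direction], new_visited, length + 1))
--
--     return resultados
-- ===== SOURCE B (Python) =====
-- movimientos = [(-1, 0, '^'), (0, 1, '>'), (1, 0, 'v'), (0, -1, '<')]
--
-- def bfs(start, goal, mapa):
--     # Iterative deepening: try path lengths L = 0, 1, ...; the first L with any
--     # matching simple path yields exactly the shortest paths.  Children are
--     # explored in reversed(movimientos) order, which is the order A emits paths.
--     def paths_of_length(x, y, visited, rem):
--         if rem == 0:
--             return [[]] if (x, y) == goal else []
--         if (x, y) == goal: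
--             return []  # never extend a path beyond the goal
--         out = []
--         for dx, dy, direction in reversed(movimientos):
--             nx, ny = x + dx, y + dy
--             if 0 <= nx < len(mapa) and 0 <= ny < len(mapa[nx]) and mapa[nx][ny] is not None and (nx, ny) not in visited:
--                 visited.add((nx, ny))
--                 for rest in paths_of_length(nx, ny, visited, rem - 1):
--                     out.append([direction] + rest)
--                 visited.discard((nx, ny))
--         return out
--     max_len = sum(len(row) for row in mapa)
--     for L in range(max_len + 1):
--         res = paths_of_length(start[0], start[1], set(), L)
--         if res:
--             return res
--     return []
-- ===== Notes on version B (the rewrite author's own statement) =====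
-- stated objective: alternative
-- what changed: A enumerates ALL simple paths with an explicit stack while tracking the minimum goal-distance seen; B uses iterative deepening (depth-limited recursive search at lengths L = 0, 1, ..., returning the first nonempty batch), so it never explores any path longer than the shortest-path length, at the price of re-running the bounded search once per depth.
import Mathlib
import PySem

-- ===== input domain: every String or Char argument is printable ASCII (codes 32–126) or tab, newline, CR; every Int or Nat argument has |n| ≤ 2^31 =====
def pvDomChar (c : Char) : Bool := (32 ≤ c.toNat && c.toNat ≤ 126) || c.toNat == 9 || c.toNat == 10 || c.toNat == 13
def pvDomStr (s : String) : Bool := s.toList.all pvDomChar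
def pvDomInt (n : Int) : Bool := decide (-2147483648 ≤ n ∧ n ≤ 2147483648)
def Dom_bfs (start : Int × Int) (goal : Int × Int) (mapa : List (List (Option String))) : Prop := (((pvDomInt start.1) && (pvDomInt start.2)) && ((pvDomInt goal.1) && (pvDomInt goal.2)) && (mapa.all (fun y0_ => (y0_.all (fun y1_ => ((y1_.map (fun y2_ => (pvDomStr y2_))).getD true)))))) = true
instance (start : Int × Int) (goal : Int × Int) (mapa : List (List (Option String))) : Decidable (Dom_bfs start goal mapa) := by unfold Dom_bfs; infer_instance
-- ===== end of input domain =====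

-- B replaces A's exhaustive DFS over ALL simple paths (tracking the minimum) by iterative
-- deepening: depth-limited search at lengths L = 0,1,…, returning the first nonempty batch.

-- ===== PORT A =====
def movimientos : List (Int × Int × String) := [(-1, 0, "^"), (0, 1, ">"), (1, 0, "v"), (0, -1, "<")]

-- the common guard '0 <= nx < len(mapa) and 0 <= ny < len(mapa[nx]) and mapa[nx][ny] is not None'
def pvFree (mapa : List (List (Option String))) (nx ny : Int) : Bool :=
  decide (0 ≤ nx) && decide (nx < (mapa.length : Int)) &&
  decide (0 ≤ ny) && decide (ny < ((PySem.List.pyGetD mapa nx []).length : Int)) &&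
  (PySem.List.pyGetD (PySem.List.pyGetD mapa nx []) ny none).isSome

-- a stack entry (fila, columna, camino, visitados, longitud)
abbrev PVNode := Int × Int × List String × PySem.Set (Int × Int) × Int

-- the 'while stack:' loop of A; min_length = float('inf') is ported as 'none';
-- the fuel argument only makes the recursion structural (proved sufficient below).
def bfsLoop (goal : Int × Int) (mapa : List (List (Option String))) :
    Nat → List PVNode → List (List String) → Option Int → List (List String)
  | 0, _, res, _ => res
  | fuel+1, stack, res, ml =>
    match stack.getLast? with
    | none => res
    | some (x, y, path, visited, length) =>
      if (x, y) = goal then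
        match ml with
        | none => bfsLoop goal mapa fuel stack.dropLast [path] (some length)
        | some m =>
          if length < m then bfsLoop goal mapa fuel stack.dropLast [path] (some length)
          else if length = m then bfsLoop goal mapa fuel stack.dropLast (res ++ [path]) ml
          else bfsLoop goal mapa fuel stack.dropLast res ml
      else
        bfsLoop goal mapa fuel
          (movimientos.foldl (fun st mv =>
            if pvFree mapa (x + mv.1) (y + mv.2.1) && !(PySem.Set.contains visited (x + mv.1, y + mv.2.1)) then
              st ++ [(x + mv.1, y + mv.2.1, path ++ [mv.2.2], PySem.Set.add visited (x + mv.1, y + mv.2.1), length + 1)]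
            else st) stack.dropLast)
          res ml

def bfs (start : Int × Int) (goal : Int × Int) (mapa : List (List (Option String))) : List (List String) :=
  bfsLoop goal mapa (5 ^ ((mapa.map List.length).sum + 2))
    [(start.1, start.2, [], PySem.Set.empty, 0)] [] none

-- ===== PORT B =====
-- depth-limited enumeration: all simple paths of exactly 'rem' further steps reaching goal
-- (Python's visited.add / recurse / visited.discard backtracking = recursing on the extended set)
def pathsOfLength (goal : Int × Int) (mapa : List (List (Option String))) :
    Nat → Int → Int → PySem.Set (Int × Int) → List (List String)
  | 0, x, y, _ => if (x, y) = goal then [[]] else []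
  | rem+1, x, y, visited =>
    if (x, y) = goal then []   -- never extend a path beyond the goal
    else movimientos.reverse.foldl (fun out mv =>
      if pvFree mapa (x + mv.1) (y + mv.2.1) && !(PySem.Set.contains visited (x + mv.1, y + mv.2.1)) then
        out ++ (pathsOfLength goal mapa rem (x + mv.1) (y + mv.2.1)
                  (PySem.Set.add visited (x + mv.1, y + mv.2.1))).map (fun rest => mv.2.2 :: rest)
      else out) []

-- 'for L in range(max_len + 1): … if res: return res' / 'return []'
def bfsAltLoop (goal : Int × Int) (mapa : List (List (Option String))) (start : Int × Int) :
    List Nat → List (List String)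
  | [] => []
  | L :: Ls =>
    let res := pathsOfLength goal mapa L start.1 start.2 PySem.Set.empty
    if res.isEmpty then bfsAltLoop goal mapa start Ls else res

def bfs_alt (start : Int × Int) (goal : Int × Int) (mapa : List (List (Option String))) : List (List String) :=
  bfsAltLoop goal mapa start (List.range ((mapa.map List.length).sum + 1))

-- ===== PRECONDITION & SPEC =====
def Spec_bfs (start : Int × Int) (goal : Int × Int) (mapa : List (List (Option String))) (out : List (List String)) : Prop := out = bfs_alt start goal mapa
instance (start : Int × Int) (goal : Int × Int) (mapa : List (List (Option String))) (out : List (List String)) : Decidable (Spec_bfs start goal mapa out) := by unfold Spec_bfs; infer_instance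

-- ===== CLAIM (what is proved, stated in full; the proofs are below) =====
def Claim_equal_bfs : Prop := ∀ (start : Int × Int) (goal : Int × Int) (mapa : List (List (Option String))), Dom_bfs start goal mapa → Spec_bfs start goal mapa (bfs start goal mapa)

-- ===== LEMMAS AND PROOFS =====

-- total number of cells of the (possibly ragged) map
def pvC (mapa : List (List (Option String))) : Nat := (mapa.map List.length).sum

-- reference enumeration: the goal-hits (camino, longitud) of the pruned search tree,
-- in the order A pops them, truncated at depth 'b'
def pvHits (goal : Int × Int) (mapa : List (List (Option String))) :
    Nat → Int → Int → List String → PySem.Set (Int × Int) → Int → List (List String × Int)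
  | 0, _, _, _, _, _ => []
  | b+1, x, y, path, visited, len =>
    if (x, y) = goal then [(path, len)]
    else movimientos.reverse.flatMap (fun mv =>
      if pvFree mapa (x + mv.1) (y + mv.2.1) && !(PySem.Set.contains visited (x + mv.1, y + mv.2.1)) then
        pvHits goal mapa b (x + mv.1) (y + mv.2.1) (path ++ [mv.2.2])
          (PySem.Set.add visited (x + mv.1, y + mv.2.1)) (len + 1)
      else [])

-- the hits contributed by one stack entry, at its canonical budget
def pvHitsOf (goal : Int × Int) (mapa : List (List (Option String))) (n : PVNode) : List (List String × Int) :=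
  pvHits goal mapa (pvC mapa + 1 - n.2.2.2.1.length) n.1 n.2.1 n.2.2.1 n.2.2.2.1 n.2.2.2.2

-- A's min-tracking accumulator as a fold step
def pvStep (acc : List (List String) × Option Int) (e : List String × Int) :
    List (List String) × Option Int :=
  match acc.2 with
  | none => ([e.1], some e.2)
  | some m => if e.2 < m then ([e.1], some e.2) else if e.2 = m then (acc.1 ++ [e.1], acc.2) else acc

def pvFoldMin (m : Int) (H : List (List String × Int)) : Int := H.foldl (fun a e => min a e.2) m

def pvW (mapa : List (List (Option String))) (stack : List PVNode) : Nat :=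
  (stack.map (fun n => 5 ^ (pvC mapa + 1 - n.2.2.2.1.length))).sum

def pvInv (mapa : List (List (Option String))) (n : PVNode) : Prop :=
  n.2.2.2.1.Nodup ∧ ∀ c ∈ n.2.2.2.1, pvFree mapa c.1 c.2 = true

-- ---- cardinality: a duplicate-free list of free cells has at most pvC mapa elements ----
def pvCode (mapa : List (List (Option String))) (c : Int × Int) : Nat :=
  ((mapa.map List.length).take c.1.toNat).sum + c.2.toNat

theorem pvFree_bounds (mapa : List (List (Option String))) (x y : Int) (h : pvFree mapa x y = true) :
    0 ≤ x ∧ 0 ≤ y ∧ x.toNat < (mapa.map List.length).length ∧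
      y.toNat < (mapa.map List.length).getD x.toNat 0 := by
  simp only [pvFree, Bool.and_eq_true, decide_eq_true_eq] at h
  obtain ⟨⟨⟨⟨hx0, hxl⟩, hy0⟩, hyl⟩, -⟩ := h
  have hxn : x.toNat < mapa.length := by omega
  refine ⟨hx0, hy0, by simpa using hxn, ?_⟩
  have hrow : PySem.List.pyGetD mapa x ([] : List (Option String)) = mapa[x.toNat] :=
    PySem.List.pyGetD_eq_getElem _ _ hx0 hxl
  rw [hrow] at hyl
  have hgd : (mapa.map List.length).getD x.toNat 0 = mapa[x.toNat].length := by
    rw [List.getD_eq_getElem _ _ (by simpa using hxn)]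
    simp
  omega

theorem pvTakeSum_mono (L : List Nat) {i j : Nat} (h : i ≤ j) :
    (L.take i).sum ≤ (L.take j).sum := by
  have h2 := List.sum_take_add_sum_drop (L.take j) i
  rw [List.take_take, Nat.min_eq_left h] at h2
  omega

theorem pvCode_lt (mapa : List (List (Option String))) (c : Int × Int)
    (h : pvFree mapa c.1 c.2 = true) : pvCode mapa c < pvC mapa := by
  obtain ⟨hx0, hy0, hxl, hyl⟩ := pvFree_bounds mapa c.1 c.2 h
  have h1 : ((mapa.map List.length).take (c.1.toNat + 1)).sum
      = ((mapa.map List.length).take c.1.toNat).sum + (mapa.map List.length)[c.1.toNat] :=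
    List.sum_take_succ _ _ hxl
  have h2 : ((mapa.map List.length).take (c.1.toNat + 1)).sum
      + ((mapa.map List.length).drop (c.1.toNat + 1)).sum = (mapa.map List.length).sum :=
    List.sum_take_add_sum_drop _ _
  have hgd : (mapa.map List.length).getD c.1.toNat 0 = (mapa.map List.length)[c.1.toNat] :=
    List.getD_eq_getElem _ _ hxl
  unfold pvCode pvC
  omega

theorem pvCode_inj (mapa : List (List (Option String))) (c d : Int × Int)
    (hc : pvFree mapa c.1 c.2 = true) (hd : pvFree mapa d.1 d.2 = true)
    (he : pvCode mapa c = pvCode mapa d) : c = d := by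
  obtain ⟨hcx, hcy, hcxl, hcyl⟩ := pvFree_bounds mapa c.1 c.2 hc
  obtain ⟨hdx, hdy, hdxl, hdyl⟩ := pvFree_bounds mapa d.1 d.2 hd
  have key : ∀ a b : Int × Int, a.1.toNat < (mapa.map List.length).length →
      a.2.toNat < (mapa.map List.length).getD a.1.toNat 0 →
      a.1.toNat < b.1.toNat → pvCode mapa a < pvCode mapa b := by
    intro a b hal hay hij
    have h1 : ((mapa.map List.length).take (a.1.toNat + 1)).sum
        = ((mapa.map List.length).take a.1.toNat).sum + (mapa.map List.length)[a.1.toNat] :=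
      List.sum_take_succ _ _ hal
    have h2 : ((mapa.map List.length).take (a.1.toNat + 1)).sum
        ≤ ((mapa.map List.length).take b.1.toNat).sum := pvTakeSum_mono _ hij
    have hgd : (mapa.map List.length).getD a.1.toNat 0 = (mapa.map List.length)[a.1.toNat] :=
      List.getD_eq_getElem _ _ hal
    unfold pvCode
    omega
  rcases Nat.lt_trichotomy c.1.toNat d.1.toNat with hlt | heq | hgt
  · exact absurd he (Nat.ne_of_lt (key c d hcxl hcyl hlt))
  · have hx : c.1 = d.1 := by omega
    unfold pvCode at he
    rw [heq] at he
    have hy : c.2 = d.2 := by omega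
    exact Prod.ext hx hy
  · exact absurd he.symm (Nat.ne_of_lt (key d c hdxl hdyl hgt))

theorem pvLen_le (mapa : List (List (Option String))) (vis : List (Int × Int))
    (hn : vis.Nodup) (hf : ∀ c ∈ vis, pvFree mapa c.1 c.2 = true) :
    vis.length ≤ pvC mapa := by
  have hm : (vis.map (pvCode mapa)).Nodup :=
    (List.nodup_map_iff_inj_on hn).mpr
      (fun a ha b hb hab => pvCode_inj mapa a b (hf a ha) (hf b hb) hab)
  have hsub : (vis.map (pvCode mapa)).toFinset ⊆ Finset.range (pvC mapa) := by
    intro k hk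
    rw [List.mem_toFinset, List.mem_map] at hk
    obtain ⟨c, hc, rfl⟩ := hk
    rw [Finset.mem_range]
    exact pvCode_lt mapa c (hf c hc)
  have hcard := Finset.card_le_card hsub
  rw [List.toFinset_card_of_nodup hm, Finset.card_range, List.length_map] at hcard
  exact hcard

-- ---- bounds on the recorded lengths ----
theorem pvHits_le (goal : Int × Int) (mapa : List (List (Option String))) :
    ∀ (b : Nat) (x y : Int) (path : List String) (vis : PySem.Set (Int × Int)) (len : Int),
      ∀ e ∈ pvHits goal mapa b x y path vis len, len ≤ e.2 := by
  intro b
  induction b with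
  | zero => intro x y path vis len e he; simp [pvHits] at he
  | succ b ih =>
    intro x y path vis len e he
    rw [pvHits] at he
    split at he
    · simp only [List.mem_singleton] at he
      simp [he]
    · rw [List.mem_flatMap] at he
      obtain ⟨mv, -, he⟩ := he
      split at he
      · have := ih _ _ _ _ _ e he
        omega
      · simp at he

theorem pvHits_lt (goal : Int × Int) (mapa : List (List (Option String))) :
    ∀ (b : Nat) (x y : Int) (path : List String) (vis : PySem.Set (Int × Int)) (len : Int),
      ∀ e ∈ pvHits goal mapa b x y path vis len, e.2 < len + (b : Int) := by
  intro b
  induction b with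
  | zero => intro x y path vis len e he; simp [pvHits] at he
  | succ b ih =>
    intro x y path vis len e he
    rw [pvHits] at he
    split at he
    · simp only [List.mem_singleton] at he
      subst he
      push_cast
      omega
    · rw [List.mem_flatMap] at he
      obtain ⟨mv, -, he⟩ := he
      split at he
      · have := ih _ _ _ _ _ e he
        push_cast at this ⊢
        omega
      · simp at he


-- ---- facts about the running minimum ----
theorem pvFoldMin_le (H : List (List String × Int)) :
    ∀ m : Int, pvFoldMin m H ≤ m ∧ ∀ e ∈ H, pvFoldMin m H ≤ e.2 := by
  induction H with
  | nil => intro m; simp [pvFoldMin]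
  | cons e t ih =>
    intro m
    have h := ih (min m e.2)
    unfold pvFoldMin at h ⊢
    rw [List.foldl_cons]
    refine ⟨le_trans h.1 (min_le_left _ _), ?_⟩
    intro f hf
    rcases List.mem_cons.mp hf with rfl | hft
    · exact le_trans h.1 (min_le_right _ _)
    · exact h.2 f hft

theorem pvFoldMin_eq_of_le (H : List (List String × Int)) :
    ∀ m : Int, (∀ e ∈ H, m ≤ e.2) → pvFoldMin m H = m := by
  induction H with
  | nil => intro m _; simp [pvFoldMin]
  | cons e t ih =>
    intro m h
    unfold pvFoldMin at ih ⊢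
    rw [List.foldl_cons, min_eq_left (h e (by simp))]
    exact ih m (fun f hf => h f (List.mem_cons_of_mem e hf))

theorem pvFoldMin_mem (H : List (List String × Int)) :
    ∀ m : Int, pvFoldMin m H = m ∨ ∃ e ∈ H, pvFoldMin m H = e.2 := by
  induction H with
  | nil => intro m; simp [pvFoldMin]
  | cons e t ih =>
    intro m
    unfold pvFoldMin at ih ⊢
    rw [List.foldl_cons]
    rcases ih (min m e.2) with h | ⟨f, hf, h⟩
    · rcases le_or_gt m e.2 with hle | hlt
      · left; rw [h, min_eq_left hle]
      · right; exact ⟨e, by simp, by rw [h, min_eq_right (le_of_lt hlt)]⟩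
    · right; exact ⟨f, List.mem_cons_of_mem e hf, h⟩

-- ---- the min-fold keeps exactly the minimal-length hits, in order ----
theorem pvSel_eq (H : List (List String × Int)) :
    ∀ (res : List (List String)) (m : Int),
      (H.foldl pvStep (res, some m)).1
        = if ∃ e ∈ H, e.2 < m then (H.filter (fun e => e.2 = pvFoldMin m H)).map Prod.fst
          else res ++ (H.filter (fun e => e.2 = m)).map Prod.fst := by
  induction H with
  | nil => intro res m; simp
  | cons e t ih =>
    intro res m
    rw [List.foldl_cons]
    have hmin : pvFoldMin m (e :: t) = pvFoldMin (min m e.2) t := by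
      unfold pvFoldMin; rw [List.foldl_cons]
    rcases lt_trichotomy e.2 m with hlt | heq | hgt
    · have hstep : pvStep (res, some m) e = ([e.1], some e.2) := by
        simp [pvStep, hlt]
      have houter : ∃ f ∈ e :: t, f.2 < m := ⟨e, by simp, hlt⟩
      rw [hstep, ih, if_pos houter, hmin, min_eq_right (le_of_lt hlt)]
      by_cases hex : ∃ f ∈ t, f.2 < e.2
      · rw [if_pos hex]
        obtain ⟨f, hf, hflt⟩ := hex
        have h1 := (pvFoldMin_le t e.2).2 f hf
        have hne : ¬ (e.2 = pvFoldMin e.2 t) := by omega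
        rw [List.filter_cons_of_neg (by simpa using hne)]
      · rw [if_neg hex]
        rw [pvFoldMin_eq_of_le t e.2
          (fun f hf => le_of_not_gt (fun hlt2 => hex ⟨f, hf, hlt2⟩))]
        rw [List.filter_cons_of_pos (by simp)]
        simp
    · have hstep : pvStep (res, some m) e = (res ++ [e.1], some m) := by
        simp [pvStep, heq]
      have hmm : pvFoldMin m (e :: t) = pvFoldMin m t := by
        rw [hmin, min_eq_left (le_of_eq heq.symm)]
      rw [hstep, ih, hmm]
      by_cases hex : ∃ f ∈ t, f.2 < m
      · have houter : ∃ f ∈ e :: t, f.2 < m := by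
          obtain ⟨f, hf, h⟩ := hex; exact ⟨f, List.mem_cons_of_mem e hf, h⟩
        rw [if_pos hex, if_pos houter]
        obtain ⟨f, hf, hflt⟩ := hex
        have h1 := (pvFoldMin_le t m).2 f hf
        have hne : ¬ (e.2 = pvFoldMin m t) := by omega
        rw [List.filter_cons_of_neg (by simpa using hne)]
      · have houter : ¬ ∃ f ∈ e :: t, f.2 < m := by
          rintro ⟨f, hf, hflt⟩
          rcases List.mem_cons.mp hf with rfl | hft
          · omega
          · exact hex ⟨f, hft, hflt⟩
        rw [if_neg hex, if_neg houter]
        rw [List.filter_cons_of_pos (by simpa using heq)]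
        simp
    · have hstep : pvStep (res, some m) e = (res, some m) := by
        simp only [pvStep]
        rw [if_neg (by omega), if_neg (by omega)]
      have hmm : pvFoldMin m (e :: t) = pvFoldMin m t := by
        rw [hmin, min_eq_left (le_of_lt hgt)]
      rw [hstep, ih, hmm]
      by_cases hex : ∃ f ∈ t, f.2 < m
      · have houter : ∃ f ∈ e :: t, f.2 < m := by
          obtain ⟨f, hf, h⟩ := hex; exact ⟨f, List.mem_cons_of_mem e hf, h⟩
        rw [if_pos hex, if_pos houter]
        have h1 := (pvFoldMin_le t m).1
        have hne : ¬ (e.2 = pvFoldMin m t) := by omega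
        rw [List.filter_cons_of_neg (by simpa using hne)]
      · have houter : ¬ ∃ f ∈ e :: t, f.2 < m := by
          rintro ⟨f, hf, hflt⟩
          rcases List.mem_cons.mp hf with rfl | hft
          · omega
          · exact hex ⟨f, hft, hflt⟩
        rw [if_neg hex, if_neg houter]
        rw [List.filter_cons_of_neg (by simp; omega)]

theorem pvSel_none (e : List String × Int) (t : List (List String × Int)) :
    ((e :: t).foldl pvStep ([], none)).1
      = ((e :: t).filter (fun f => f.2 = pvFoldMin e.2 t)).map Prod.fst := by
  rw [List.foldl_cons]
  have hstep : pvStep ([], none) e = ([e.1], some e.2) := by simp [pvStep]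
  rw [hstep, pvSel_eq]
  by_cases hex : ∃ f ∈ t, f.2 < e.2
  · rw [if_pos hex]
    obtain ⟨f, hf, hflt⟩ := hex
    have h1 := (pvFoldMin_le t e.2).2 f hf
    have hne : ¬ (e.2 = pvFoldMin e.2 t) := by omega
    rw [List.filter_cons_of_neg (by simpa using hne)]
  · rw [if_neg hex]
    rw [pvFoldMin_eq_of_le t e.2
      (fun f hf => le_of_not_gt (fun hlt2 => hex ⟨f, hf, hlt2⟩))]
    rw [List.filter_cons_of_pos (by simp)]
    simp

-- loop shape: 'if cond: out.extend(g(mv))' over a list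
theorem pv_foldl_if_append {γ β : Type} (l : List γ) (p : γ → Bool) (g : γ → List β) :
    ∀ acc : List β,
      l.foldl (fun out mv => if p mv then out ++ g mv else out) acc
        = acc ++ l.flatMap (fun mv => if p mv then g mv else []) := by
  induction l with
  | nil => intro acc; simp
  | cons mv t ih =>
    intro acc
    rw [List.foldl_cons, List.flatMap_cons]
    by_cases h : p mv = true
    · rw [if_pos h, if_pos h, ih, List.append_assoc]
    · rw [if_neg h, if_neg h, ih]
      simp

theorem pv_flatMap_filter {γ β : Type} (l : List γ) (p : γ → Bool) (h : γ → List β) :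
    (l.filter p).flatMap h = l.flatMap (fun x => if p x then h x else []) := by
  induction l with
  | nil => simp
  | cons mv t ih =>
    by_cases hp : p mv = true
    · rw [List.filter_cons_of_pos hp, List.flatMap_cons, List.flatMap_cons, if_pos hp, ih]
    · rw [List.filter_cons_of_neg hp, List.flatMap_cons, if_neg hp, ih]
      simp

-- ---- A's loop computes the min-fold over the hit list ----
theorem pvHitsOf_expand (goal : Int × Int) (mapa : List (List (Option String)))
    (x y : Int) (path : List String) (vis : PySem.Set (Int × Int)) (len : Int)
    (hg : ¬ (x, y) = goal) (hk : vis.length ≤ pvC mapa) :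
    (((movimientos.filter (fun mv => pvFree mapa (x + mv.1) (y + mv.2.1) &&
          !(PySem.Set.contains vis (x + mv.1, y + mv.2.1)))).map
        (fun mv => (x + mv.1, y + mv.2.1, path ++ [mv.2.2],
          PySem.Set.add vis (x + mv.1, y + mv.2.1), len + 1) : Int × Int × String → PVNode)).reverse).flatMap
        (pvHitsOf goal mapa)
      = pvHitsOf goal mapa (x, y, path, vis, len) := by
  have hlen : ∀ mv : Int × Int × String,
      (pvFree mapa (x + mv.1) (y + mv.2.1) && !(PySem.Set.contains vis (x + mv.1, y + mv.2.1))) = true →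
      (PySem.Set.add vis (x + mv.1, y + mv.2.1)).length = vis.length + 1 := by
    intro mv hpm
    simp only [Bool.and_eq_true, Bool.not_eq_true'] at hpm
    have hnm : (x + mv.1, y + mv.2.1) ∉ vis := by
      intro hmem
      rw [← PySem.Set.contains_iff vis _] at hmem
      rw [hpm.2] at hmem
      exact Bool.false_ne_true hmem
    rw [PySem.Set.add_of_not_mem hnm, List.length_append, List.length_singleton]
  rw [← List.map_reverse, ← List.filter_reverse, List.flatMap_map, pv_flatMap_filter]
  conv_rhs => rw [pvHitsOf]
  simp only
  obtain ⟨c, hc⟩ : ∃ c, pvC mapa + 1 - vis.length = c + 1 := ⟨pvC mapa - vis.length, by omega⟩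
  rw [hc, pvHits, if_neg hg]
  congr 1
  funext mv
  by_cases hpm : (pvFree mapa (x + mv.1) (y + mv.2.1) && !(PySem.Set.contains vis (x + mv.1, y + mv.2.1))) = true
  · rw [if_pos hpm, if_pos hpm]
    rw [pvHitsOf]
    simp only
    rw [hlen mv hpm]
    have : pvC mapa + 1 - (vis.length + 1) = c := by omega
    rw [this]
  · rw [if_neg hpm, if_neg hpm]

theorem bfsLoop_eq (goal : Int × Int) (mapa : List (List (Option String))) :
    ∀ (fuel : Nat) (stack : List PVNode) (res : List (List String)) (ml : Option Int),
      (∀ n ∈ stack, pvInv mapa n) → pvW mapa stack ≤ fuel →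
      bfsLoop goal mapa fuel stack res ml
        = (((stack.reverse).flatMap (pvHitsOf goal mapa)).foldl pvStep (res, ml)).1 := by
  intro fuel
  induction fuel with
  | zero =>
    intro stack res ml hinv hW
    cases stack with
    | nil => simp [bfsLoop]
    | cons n t =>
      exfalso
      unfold pvW at hW
      rw [List.map_cons, List.sum_cons] at hW
      have hpos : 1 ≤ 5 ^ (pvC mapa + 1 - n.2.2.2.1.length) := Nat.one_le_pow _ _ (by norm_num)
      omega
  | succ fuel ih =>
    intro stack res ml hinv hW
    rcases hL : stack.getLast? with _ | n
    · rw [List.getLast?_eq_none_iff.mp hL]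
      simp [bfsLoop]
    · have hne : stack ≠ [] := by
        intro h; rw [h] at hL; simp at hL
      have hlast : stack.getLast hne = n := List.getLast_of_mem_getLast? hL
      have hstack : stack.dropLast ++ [n] = stack := by
        rw [← hlast]; exact List.dropLast_concat_getLast hne
      obtain ⟨x, y, path, vis, len⟩ := n
      have hinvn : pvInv mapa (x, y, path, vis, len) :=
        hinv _ (by rw [← hstack]; exact List.mem_append_right _ (by simp))
      have hinvt : ∀ m ∈ stack.dropLast, pvInv mapa m := fun m hm =>
        hinv m (by rw [← hstack]; exact List.mem_append_left _ hm)
      have hk : vis.length ≤ pvC mapa := pvLen_le mapa vis hinvn.1 hinvn.2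
      have hWsplit : pvW mapa stack = pvW mapa stack.dropLast + 5 ^ (pvC mapa + 1 - vis.length) := by
        conv_lhs => rw [← hstack]
        unfold pvW
        rw [List.map_append, List.sum_append]
        simp
      have hrev : stack.reverse = (x, y, path, vis, len) :: stack.dropLast.reverse := by
        conv_lhs => rw [← hstack]
        rw [List.reverse_append]
        simp
      have hpos : 1 ≤ 5 ^ (pvC mapa + 1 - vis.length) := Nat.one_le_pow _ _ (by norm_num)
      simp only [bfsLoop, hL]
      by_cases hg : (x, y) = goal
      · rw [if_pos hg]
        have hhits : pvHitsOf goal mapa (x, y, path, vis, len) = [(path, len)] := by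
          rw [pvHitsOf]
          simp only
          obtain ⟨c, hc⟩ : ∃ c, pvC mapa + 1 - vis.length = c + 1 := ⟨pvC mapa - vis.length, by omega⟩
          rw [hc, pvHits, if_pos hg]
        rw [hrev, List.flatMap_cons, hhits, List.singleton_append, List.foldl_cons]
        have hWd : pvW mapa stack.dropLast ≤ fuel := by omega
        cases ml with
        | none =>
          dsimp only
          rw [ih stack.dropLast [path] (some len) hinvt hWd]
          rfl
        | some m =>
          dsimp only
          rcases lt_trichotomy len m with h1 | h1 | h1
          · rw [if_pos h1, ih stack.dropLast [path] (some len) hinvt hWd]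
            have hs : pvStep (res, some m) (path, len) = ([path], some len) := by
              simp [pvStep, h1]
            rw [hs]
          · rw [if_neg (by omega), if_pos h1, ih stack.dropLast (res ++ [path]) (some m) hinvt hWd]
            have hs : pvStep (res, some m) (path, len) = (res ++ [path], some m) := by
              simp [pvStep, h1]
            rw [hs]
          · rw [if_neg (by omega), if_neg (by omega), ih stack.dropLast res (some m) hinvt hWd]
            have hs : pvStep (res, some m) (path, len) = (res, some m) := by
              simp only [pvStep]
              rw [if_neg (by omega), if_neg (by omega)]
            rw [hs]
      · rw [if_neg hg]
        rw [PySem.List.foldl_append_if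
              (fun mv => pvFree mapa (x + mv.1) (y + mv.2.1) && !(PySem.Set.contains vis (x + mv.1, y + mv.2.1)))
              (fun mv => (x + mv.1, y + mv.2.1, path ++ [mv.2.2],
                PySem.Set.add vis (x + mv.1, y + mv.2.1), len + 1))
              movimientos stack.dropLast]
        have hkid : ∀ m ∈ (movimientos.filter (fun mv => pvFree mapa (x + mv.1) (y + mv.2.1) &&
            !(PySem.Set.contains vis (x + mv.1, y + mv.2.1)))).map
              (fun mv => ((x + mv.1, y + mv.2.1, path ++ [mv.2.2],
                PySem.Set.add vis (x + mv.1, y + mv.2.1), len + 1) : PVNode)), pvInv mapa m := by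
          intro m hm
          rw [List.mem_map] at hm
          obtain ⟨mv, hmv, rfl⟩ := hm
          have hpmv := (List.mem_filter.mp hmv).2
          simp only [Bool.and_eq_true, Bool.not_eq_true'] at hpmv
          have hnm : (x + mv.1, y + mv.2.1) ∉ vis := by
            intro hmem
            rw [← PySem.Set.contains_iff vis _] at hmem
            rw [hpmv.2] at hmem
            exact Bool.false_ne_true hmem
          constructor
          · exact PySem.Set.nodup_add vis _ hinvn.1
          · intro cc hcc
            rcases (PySem.Set.mem_add _ _ _).mp hcc with h | h
            · exact hinvn.2 cc h
            · rw [h]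
              exact hpmv.1
        have hlen : ∀ mv : Int × Int × String,
            (pvFree mapa (x + mv.1) (y + mv.2.1) && !(PySem.Set.contains vis (x + mv.1, y + mv.2.1))) = true →
            (PySem.Set.add vis (x + mv.1, y + mv.2.1)).length = vis.length + 1 := by
          intro mv hpm
          simp only [Bool.and_eq_true, Bool.not_eq_true'] at hpm
          have hnm : (x + mv.1, y + mv.2.1) ∉ vis := by
            intro hmem
            rw [← PySem.Set.contains_iff vis _] at hmem
            rw [hpm.2] at hmem
            exact Bool.false_ne_true hmem
          rw [PySem.Set.add_of_not_mem hnm, List.length_append, List.length_singleton]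
        have hWk : pvW mapa ((movimientos.filter (fun mv => pvFree mapa (x + mv.1) (y + mv.2.1) &&
            !(PySem.Set.contains vis (x + mv.1, y + mv.2.1)))).map
              (fun mv => ((x + mv.1, y + mv.2.1, path ++ [mv.2.2],
                PySem.Set.add vis (x + mv.1, y + mv.2.1), len + 1) : PVNode)))
            ≤ 4 * 5 ^ (pvC mapa - vis.length) := by
          unfold pvW
          rw [List.map_map]
          have hconst : ∀ mv ∈ movimientos.filter (fun mv => pvFree mapa (x + mv.1) (y + mv.2.1) &&
              !(PySem.Set.contains vis (x + mv.1, y + mv.2.1))),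
              ((fun n : PVNode => 5 ^ (pvC mapa + 1 - n.2.2.2.1.length)) ∘
                (fun mv => ((x + mv.1, y + mv.2.1, path ++ [mv.2.2],
                  PySem.Set.add vis (x + mv.1, y + mv.2.1), len + 1) : PVNode))) mv
                = 5 ^ (pvC mapa - vis.length) := by
            intro mv hmv
            simp only [Function.comp]
            rw [hlen mv (List.mem_filter.mp hmv).2]
            congr 1
            omega
          rw [List.map_congr_left hconst]
          simp only [List.map_const']
          rw [List.sum_replicate, smul_eq_mul]
          have hcnt : (movimientos.filter (fun mv => pvFree mapa (x + mv.1) (y + mv.2.1) &&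
              !(PySem.Set.contains vis (x + mv.1, y + mv.2.1)))).length ≤ 4 := by
            have h4 := List.length_filter_le (fun mv => pvFree mapa (x + mv.1) (y + mv.2.1) &&
              !(PySem.Set.contains vis (x + mv.1, y + mv.2.1))) movimientos
            simpa [movimientos] using h4
          exact Nat.mul_le_mul_right _ hcnt
        have hWapp : pvW mapa (stack.dropLast ++ (movimientos.filter (fun mv => pvFree mapa (x + mv.1) (y + mv.2.1) &&
            !(PySem.Set.contains vis (x + mv.1, y + mv.2.1)))).map
              (fun mv => ((x + mv.1, y + mv.2.1, path ++ [mv.2.2],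
                PySem.Set.add vis (x + mv.1, y + mv.2.1), len + 1) : PVNode)))
            = pvW mapa stack.dropLast + pvW mapa ((movimientos.filter (fun mv => pvFree mapa (x + mv.1) (y + mv.2.1) &&
            !(PySem.Set.contains vis (x + mv.1, y + mv.2.1)))).map
              (fun mv => ((x + mv.1, y + mv.2.1, path ++ [mv.2.2],
                PySem.Set.add vis (x + mv.1, y + mv.2.1), len + 1) : PVNode))) := by
          unfold pvW
          rw [List.map_append, List.sum_append]
        have h5 : 5 ^ (pvC mapa + 1 - vis.length) = 5 * 5 ^ (pvC mapa - vis.length) := by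
          rw [show pvC mapa + 1 - vis.length = (pvC mapa - vis.length) + 1 by omega, pow_succ]
          ring
        have ha : 1 ≤ 5 ^ (pvC mapa - vis.length) := Nat.one_le_pow _ _ (by norm_num)
        have hW' : pvW mapa (stack.dropLast ++ (movimientos.filter (fun mv => pvFree mapa (x + mv.1) (y + mv.2.1) &&
            !(PySem.Set.contains vis (x + mv.1, y + mv.2.1)))).map
              (fun mv => ((x + mv.1, y + mv.2.1, path ++ [mv.2.2],
                PySem.Set.add vis (x + mv.1, y + mv.2.1), len + 1) : PVNode))) ≤ fuel := by
          omega
        rw [ih _ res ml (by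
          intro m hm
          rcases List.mem_append.mp hm with h | h
          · exact hinvt m h
          · exact hkid m h) hW']
        have hsets : ((stack.dropLast ++ (movimientos.filter (fun mv => pvFree mapa (x + mv.1) (y + mv.2.1) &&
            !(PySem.Set.contains vis (x + mv.1, y + mv.2.1)))).map
              (fun mv => ((x + mv.1, y + mv.2.1, path ++ [mv.2.2],
                PySem.Set.add vis (x + mv.1, y + mv.2.1), len + 1) : PVNode))).reverse).flatMap (pvHitsOf goal mapa)
            = (stack.reverse).flatMap (pvHitsOf goal mapa) := by
          rw [List.reverse_append, List.flatMap_append, hrev, List.flatMap_cons]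
          congr 1
          exact pvHitsOf_expand goal mapa x y path vis len hg hk
        rw [hsets]

-- ---- B's depth-limited search = the hits of exactly that length ----
theorem pathsOfLength_eq (goal : Int × Int) (mapa : List (List (Option String))) :
    ∀ (rem b : Nat) (x y : Int) (path : List String) (vis : PySem.Set (Int × Int)) (len : Int),
      rem < b →
      ((pvHits goal mapa b x y path vis len).filter (fun e => e.2 = len + (rem : Int))).map Prod.fst
        = (pathsOfLength goal mapa rem x y vis).map (fun s => path ++ s) := by
  intro rem
  induction rem with
  | zero =>
    intro b x y path vis len hb
    obtain ⟨b', rfl⟩ : ∃ b', b = b' + 1 := ⟨b - 1, by omega⟩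
    rw [pvHits, pathsOfLength]
    by_cases hg : (x, y) = goal
    · rw [if_pos hg, if_pos hg]
      simp
    · rw [if_neg hg, if_neg hg]
      simp only [List.map_nil]
      rw [List.map_eq_nil_iff, List.filter_eq_nil_iff]
      intro a ha
      rw [List.mem_flatMap] at ha
      obtain ⟨mv, -, ha⟩ := ha
      split at ha
      · have := pvHits_le goal mapa b' _ _ _ _ _ a ha
        simp only [decide_eq_true_eq, Nat.cast_zero, add_zero]
        omega
      · simp at ha
  | succ rem ih =>
    intro b x y path vis len hb
    obtain ⟨b', rfl⟩ : ∃ b', b = b' + 1 := ⟨b - 1, by omega⟩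
    have hb' : rem < b' := by omega
    rw [pvHits, pathsOfLength]
    by_cases hg : (x, y) = goal
    · rw [if_pos hg, if_pos hg]
      simp only [List.map_nil]
      rw [List.map_eq_nil_iff, List.filter_eq_nil_iff]
      intro a ha
      rw [List.mem_singleton] at ha
      subst ha
      simp only [decide_eq_true_eq]
      push_cast
      omega
    · rw [if_neg hg, if_neg hg]
      rw [pv_foldl_if_append movimientos.reverse
            (fun mv => pvFree mapa (x + mv.1) (y + mv.2.1) && !(PySem.Set.contains vis (x + mv.1, y + mv.2.1)))
            (fun mv => (pathsOfLength goal mapa rem (x + mv.1) (y + mv.2.1)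
                  (PySem.Set.add vis (x + mv.1, y + mv.2.1))).map (fun rest => mv.2.2 :: rest)) []]
      rw [List.filter_flatMap, List.nil_append, List.map_flatMap, List.map_flatMap]
      congr 1
      funext mv
      by_cases hc : (pvFree mapa (x + mv.1) (y + mv.2.1) && !(PySem.Set.contains vis (x + mv.1, y + mv.2.1))) = true
      · rw [if_pos hc, if_pos hc]
        have hpred : ∀ e ∈ pvHits goal mapa b' (x + mv.1) (y + mv.2.1) (path ++ [mv.2.2])
            (PySem.Set.add vis (x + mv.1, y + mv.2.1)) (len + 1),
            (decide (e.2 = len + ((rem : Nat) + 1 : Nat))) = decide (e.2 = (len + 1) + (rem : Int)) := by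
          intro e _
          rw [decide_eq_decide]
          push_cast
          omega
        rw [List.filter_congr hpred, ih b' (x + mv.1) (y + mv.2.1) (path ++ [mv.2.2]) _ (len + 1) hb']
        simp only [List.map_map]
        apply List.map_congr_left
        intro s _
        simp
      · rw [if_neg hc, if_neg hc]
        simp

-- ---- assembling both programs to the same hit list ----
theorem bfs_eq_fold (start goal : Int × Int) (mapa : List (List (Option String))) :
    bfs start goal mapa
      = ((pvHits goal mapa (pvC mapa + 1) start.1 start.2 [] [] 0).foldl pvStep ([], none)).1 := by
  unfold bfs
  rw [bfsLoop_eq goal mapa _ _ _ _ ?hinv ?hW]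
  case hinv =>
    intro n hn
    rw [List.mem_singleton] at hn
    subst hn
    exact ⟨List.nodup_nil, by simp [PySem.Set.empty]⟩
  case hW =>
    unfold pvW pvC
    simp [PySem.Set.empty]
    exact Nat.pow_le_pow_right (by norm_num) (by omega)
  rw [List.reverse_singleton, List.flatMap_singleton, pvHitsOf]
  simp [PySem.Set.empty, pvC]

theorem bfsAltLoop_skip (goal : Int × Int) (mapa : List (List (Option String))) (start : Int × Int) :
    ∀ (Ls1 Ls2 : List Nat),
      (∀ L ∈ Ls1, pathsOfLength goal mapa L start.1 start.2 PySem.Set.empty = []) →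
      bfsAltLoop goal mapa start (Ls1 ++ Ls2) = bfsAltLoop goal mapa start Ls2 := by
  intro Ls1
  induction Ls1 with
  | nil => intro Ls2 _; rfl
  | cons L t ih =>
    intro Ls2 h
    rw [List.cons_append, bfsAltLoop]
    rw [h L (by simp)]
    simp only [List.isEmpty_nil, if_true]
    exact ih Ls2 (fun L' hL' => h L' (List.mem_cons_of_mem _ hL'))

theorem bfs_alt_eq (start goal : Int × Int) (mapa : List (List (Option String))) :
    bfs_alt start goal mapa
      = ((pvHits goal mapa (pvC mapa + 1) start.1 start.2 [] [] 0).foldl pvStep ([], none)).1 := by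
  have hpaths : ∀ L : Nat, L < pvC mapa + 1 →
      pathsOfLength goal mapa L start.1 start.2 PySem.Set.empty
        = ((pvHits goal mapa (pvC mapa + 1) start.1 start.2 [] [] 0).filter
            (fun e => e.2 = (L : Int))).map Prod.fst := by
    intro L hL
    have h := pathsOfLength_eq goal mapa L (pvC mapa + 1) start.1 start.2 [] [] 0 hL
    rw [show (fun s : List String => [] ++ s) = id from funext (fun s => List.nil_append s),
        List.map_id] at h
    rw [show (PySem.Set.empty : PySem.Set (Int × Int)) = [] from rfl, ← h]
    congr 1
    apply List.filter_congr
    intro e _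
    rw [decide_eq_decide]
    omega
  cases hH : pvHits goal mapa (pvC mapa + 1) start.1 start.2 [] [] 0 with
  | nil =>
    have hall : ∀ L ∈ List.range (pvC mapa + 1),
        pathsOfLength goal mapa L start.1 start.2 PySem.Set.empty = [] := by
      intro L hL
      rw [hpaths L (List.mem_range.mp hL), hH]
      rfl
    have hskip := bfsAltLoop_skip goal mapa start (List.range (pvC mapa + 1)) [] hall
    rw [List.append_nil] at hskip
    show bfsAltLoop goal mapa start (List.range (pvC mapa + 1)) = _
    rw [hskip]
    rfl
  | cons e t =>
    have hall : ∀ f ∈ e :: t, pvFoldMin e.2 t ≤ f.2 := by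
      intro f hf
      rcases List.mem_cons.mp hf with rfl | hft
      · exact (pvFoldMin_le t f.2).1
      · exact (pvFoldMin_le t e.2).2 f hft
    have hmem : ∃ f ∈ e :: t, f.2 = pvFoldMin e.2 t := by
      rcases pvFoldMin_mem t e.2 with h | ⟨f, hf, h⟩
      · exact ⟨e, by simp, h.symm⟩
      · exact ⟨f, List.mem_cons_of_mem _ hf, h.symm⟩
    obtain ⟨f, hfmem, hfM⟩ := hmem
    have hf0 : (0 : Int) ≤ f.2 :=
      pvHits_le goal mapa (pvC mapa + 1) start.1 start.2 [] [] 0 f (by rw [hH]; exact hfmem)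
    have hfC : f.2 < (0 : Int) + ((pvC mapa + 1 : Nat) : Int) :=
      pvHits_lt goal mapa (pvC mapa + 1) start.1 start.2 [] [] 0 f (by rw [hH]; exact hfmem)
    have hM0 : (0 : Int) ≤ pvFoldMin e.2 t := hfM ▸ hf0
    have hMC : (pvFoldMin e.2 t).toNat ≤ pvC mapa := by
      push_cast at hfC
      omega
    have hMn : (((pvFoldMin e.2 t).toNat : Nat) : Int) = pvFoldMin e.2 t := by omega
    obtain ⟨tl, htl⟩ : ∃ tl, (List.range (pvC mapa + 1 - (pvFoldMin e.2 t).toNat)).map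
        (fun k => (pvFoldMin e.2 t).toNat + k) = (pvFoldMin e.2 t).toNat :: tl := by
      rw [show pvC mapa + 1 - (pvFoldMin e.2 t).toNat = (pvC mapa - (pvFoldMin e.2 t).toNat) + 1
            by omega,
          List.range_succ_eq_map]
      exact ⟨(List.map Nat.succ (List.range (pvC mapa - (pvFoldMin e.2 t).toNat))).map
        (fun k => (pvFoldMin e.2 t).toNat + k), by rw [List.map_cons, Nat.add_zero]⟩
    have hsplit : List.range (pvC mapa + 1)
        = List.range (pvFoldMin e.2 t).toNat ++ ((pvFoldMin e.2 t).toNat :: tl) := by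
      rw [← htl, ← List.range_add]
      congr 1
      omega
    have hskip : ∀ L ∈ List.range (pvFoldMin e.2 t).toNat,
        pathsOfLength goal mapa L start.1 start.2 PySem.Set.empty = [] := by
      intro L hL
      have hLlt := List.mem_range.mp hL
      rw [hpaths L (by omega), hH]
      rw [List.map_eq_nil_iff, List.filter_eq_nil_iff]
      intro a ha
      have h1 := hall a ha
      simp only [decide_eq_true_eq]
      omega
    have hpathsM : pathsOfLength goal mapa (pvFoldMin e.2 t).toNat start.1 start.2 PySem.Set.empty
        = ((e :: t).filter (fun x => x.2 = pvFoldMin e.2 t)).map Prod.fst := by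
      rw [hpaths (pvFoldMin e.2 t).toNat (by omega), hH, hMn]
    have hne : (((e :: t).filter (fun x => x.2 = pvFoldMin e.2 t)).map Prod.fst).isEmpty = false := by
      rw [List.isEmpty_eq_false_iff, ← List.length_pos_iff, List.length_map, List.length_pos_iff]
      intro hnil
      rw [List.filter_eq_nil_iff] at hnil
      exact hnil f hfmem (by simpa using hfM)
    show bfsAltLoop goal mapa start (List.range (pvC mapa + 1)) = _
    rw [hsplit, bfsAltLoop_skip goal mapa start _ _ hskip, bfsAltLoop]
    rw [hpathsM, hne]
    rw [if_neg (by simp)]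
    rw [pvSel_none]

-- ===== VERDICT (by name: the statement is the Claim_ definition above) =====
theorem bfs_spec : Claim_equal_bfs := by
  intro start goal mapa _
  unfold Spec_bfs
  rw [bfs_eq_fold, bfs_alt_eq]
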